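-- pv_equiv track=rewrite | github.com/Oblum1989/taller1python | main.py | copia_examen
-- ===== SOURCE A (Python) =====
-- def copia_examen(examenes):
--   lista_examenes = examenes[0]
--   memoria_profesor = examenes[1]
--   copias_encontradas_profesor = 0
--   copias_encontradas_total = 0
--   for i in range(0, len(lista_examenes)):
--     respuesta_examen = lista_examenes[i]
--     if (i-memoria_profesor) < 0:
--       i_profe = 0
--     else:
--       i_profe = i-memoria_profesor
--
--     if respuesta_examen in lista_examenes[(i_profe):i]:
--       copias_encontradas_profesor += 1
--     if respuesta_examen in lista_examenes[:i]:
--       copias_encontradas_total += 1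
--   return(copias_encontradas_total, copias_encontradas_profesor)
-- ===== SOURCE B (Python) =====
-- def copia_examen(examenes):
--     lista, memoria = examenes
--     # Phase 1: group the positions of each answer value.
--     pos = {}
--     for i, x in enumerate(lista):
--         pos.setdefault(x, []).append(i)
--     # Total duplicates = answers minus distinct values (every non-first occurrence).
--     total = len(lista) - len(pos)
--     # An index is a window duplicate iff the gap to the previous occurrence
--     # of the same value is at most memoria.
--     ventana = 0
--     for idxs in pos.values():
--         for prev, cur in zip(idxs, idxs[1:]):
--             if cur - prev <= memoria:
--                 ventana += 1
--     return (total, ventana)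
-- ===== Notes on version B (the rewrite author's own statement) =====
-- stated objective: faster
-- what changed: replaces A's per-index prefix/window slice scans by a staged algorithm: one grouping pass builds a value->positions index, the total is the closed form len(lista)-len(pos), and the window count is read off as the number of consecutive-position gaps <= memoria within each group
import Mathlib
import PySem

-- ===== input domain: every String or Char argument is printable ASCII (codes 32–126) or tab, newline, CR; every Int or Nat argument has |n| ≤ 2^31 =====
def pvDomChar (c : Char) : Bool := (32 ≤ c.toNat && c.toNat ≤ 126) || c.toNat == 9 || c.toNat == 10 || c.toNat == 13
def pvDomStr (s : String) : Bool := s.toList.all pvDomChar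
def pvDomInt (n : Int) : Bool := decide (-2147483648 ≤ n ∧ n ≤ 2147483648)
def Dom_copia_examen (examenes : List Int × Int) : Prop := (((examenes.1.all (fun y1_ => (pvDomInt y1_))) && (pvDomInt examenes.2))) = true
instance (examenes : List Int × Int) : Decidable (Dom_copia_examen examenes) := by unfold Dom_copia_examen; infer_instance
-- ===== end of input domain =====

-- B replaces A's per-index prefix/window slice scans by a staged algorithm: one grouping
-- pass builds a value→positions index, the total is the closed form len - #distinct, and
-- the window count is the number of consecutive-position gaps ≤ memoria inside each group
-- (objective: faster).

-- ===== PORT A =====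
-- loop body of A's 'for i in range(0, len(lista_examenes))'; state = (copias_total, copias_profesor)
def pvStepA (lista : List Int) (m : Int) (st : Int × Int) (i : Int) : Int × Int :=
  let respuesta := PySem.List.pyGetD lista i 0   -- lista_examenes[i]; i ∈ range(0,len) so always in range
  let i_profe : Int := if i - m < 0 then 0 else i - m
  let st := if (PySem.List.slice lista (some i_profe) (some i)).contains respuesta
            then (st.1, st.2 + 1) else st
  if (PySem.List.slice lista none (some i)).contains respuesta
  then (st.1 + 1, st.2) else st

def copia_examen (examenes : List Int × Int) : Int × Int :=
  let lista := examenes.1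
  let m := examenes.2
  let st := (PySem.List.pyRange 0 (lista.length : Int) 1).foldl (pvStepA lista m) (0, 0)
  (st.1, st.2)

-- ===== PORT B =====
-- inner loop of B's 'for prev, cur in zip(idxs, idxs[1:])', threading the accumulator
def pvGapsFrom (m a : Int) (idxs : List Int) : Int :=
  (idxs.zip idxs.tail).foldl (fun a2 p => if p.2 - p.1 ≤ m then a2 + 1 else a2) a

def copia_examen_alt (examenes : List Int × Int) : Int × Int :=
  let lista := examenes.1
  let memoria := examenes.2
  -- 'pos.setdefault(x, []).append(i)' over enumerate(lista) = Dict.modify with default []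
  let pos := (PySem.List.enumerate lista).foldl
      (fun d p => PySem.Dict.modify d p.2 [] (fun l => l ++ [p.1])) PySem.Dict.empty
  let total := (lista.length : Int) - (PySem.Dict.size pos : Int)
  let ventana := (PySem.Dict.values pos).foldl (fun a idxs => pvGapsFrom memoria a idxs) 0
  (total, ventana)

-- ===== PRECONDITION & SPEC =====
def Spec_copia_examen (examenes : List Int × Int) (out : Int × Int) : Prop := out = copia_examen_alt examenes
instance (examenes : List Int × Int) (out : Int × Int) : Decidable (Spec_copia_examen examenes out) := by unfold Spec_copia_examen; infer_instance

-- ===== CLAIM (what is proved, stated in full; the proofs are below) =====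
def Claim_equal_copia_examen : Prop := ∀ (examenes : List Int × Int), Dom_copia_examen examenes → Spec_copia_examen examenes (copia_examen examenes)

-- ===== LEMMAS AND PROOFS =====

-- positions of x in lista, and the last one (-1 when absent)
def pvOcc (lista : List Int) (x : Int) : List Int :=
  ((PySem.List.enumerate lista).filter (fun p => p.2 == x)).map (fun p => p.1)

def pvMax (lista : List Int) (x : Int) : Int := (pvOcc lista x).getLastD (-1)

def pvGaps (m : Int) (idxs : List Int) : Int :=
  ((idxs.zip idxs.tail).countP (fun p => decide (p.2 - p.1 ≤ m)) : Int)

theorem pvGapsFrom_eq (m a : Int) (idxs : List Int) : pvGapsFrom m a idxs = a + pvGaps m idxs := by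
  unfold pvGapsFrom pvGaps
  rw [show (fun (a2 : Int) (p : Int × Int) => if p.2 - p.1 ≤ m then a2 + 1 else a2)
        = (fun (a2 : Int) (p : Int × Int) => if (fun (p : Int × Int) => decide (p.2 - p.1 ≤ m)) p = true then a2 + 1 else a2) by
      funext a2 p; simp]
  exact PySem.List.foldl_count_if _ _ a

theorem pv_enum_snoc (l : List Int) (x : Int) (s : Int) :
    PySem.List.enumerate (l ++ [x]) s = PySem.List.enumerate l s ++ [(s + l.length, x)] := by
  induction l generalizing s with
  | nil => simp [PySem.List.enumerate_cons, PySem.List.enumerate_nil]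
  | cons a t ih =>
    simp only [List.cons_append, PySem.List.enumerate_cons, ih, List.length_cons]
    push_cast
    ring_nf

theorem pvOcc_snoc (init : List Int) (x y : Int) :
    pvOcc (init ++ [x]) y = pvOcc init y ++ (if y = x then [(init.length : Int)] else []) := by
  unfold pvOcc
  rw [pv_enum_snoc, List.filter_append, List.map_append]
  by_cases h : y = x
  · subst h; simp
  · have h' : ¬ x = y := fun e => h e.symm
    simp [h, h', beq_iff_eq]

theorem pvMax_snoc (init : List Int) (x y : Int) :
    pvMax (init ++ [x]) y = if y = x then (init.length : Int) else pvMax init y := by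
  unfold pvMax
  rw [pvOcc_snoc]
  by_cases h : y = x <;> simp [h]

theorem pvMax_lt (init : List Int) (x : Int) : pvMax init x < (init.length : Int) := by
  induction init using List.reverseRecOn with
  | nil => simp [pvMax, pvOcc, PySem.List.enumerate_nil]
  | append_singleton init y ih =>
    rw [pvMax_snoc]
    simp only [List.length_append, List.length_cons, List.length_nil]
    split <;> push_cast <;> omega

theorem pvMax_nonneg_iff (init : List Int) (x : Int) : 0 ≤ pvMax init x ↔ x ∈ init := by
  induction init using List.reverseRecOn with
  | nil => simp [pvMax, pvOcc, PySem.List.enumerate_nil]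
  | append_singleton init y ih =>
    rw [pvMax_snoc]
    by_cases h : x = y <;> simp [h, ih]

theorem pvOcc_eq_nil_of_not_mem (init : List Int) (x : Int) (h : x ∉ init) : pvOcc init x = [] := by
  induction init using List.reverseRecOn with
  | nil => simp [pvOcc, PySem.List.enumerate_nil]
  | append_singleton init y ih =>
    rw [pvOcc_snoc]
    simp only [List.mem_append, List.mem_singleton, not_or] at h
    simp [h.2, ih h.1]

theorem pv_mem_drop_iff (init : List Int) (x : Int) (d : Nat) :
    x ∈ init.drop d ↔ (d : Int) ≤ pvMax init x := by
  induction init using List.reverseRecOn generalizing d with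
  | nil => simp [pvMax, pvOcc, PySem.List.enumerate_nil]; omega
  | append_singleton init y ih =>
    by_cases hd : d ≤ init.length
    · rw [List.drop_append_of_le_length hd, pvMax_snoc]
      by_cases hxy : x = y
      · rw [if_pos hxy]
        simp only [List.mem_append, List.mem_singleton]
        constructor
        · intro _; exact_mod_cast hd
        · intro _; exact Or.inr hxy
      · simp only [if_neg hxy, List.mem_append, List.mem_singleton]
        rw [← ih]
        simp [hxy]
    · have h1 : (init ++ [y]).drop d = [] := List.drop_eq_nil_of_le (by simp; omega)
      have h2 := pvMax_lt (init ++ [y]) x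
      simp only [List.length_append, List.length_cons, List.length_nil] at h2
      rw [h1]
      simp only [List.not_mem_nil, false_iff, not_le]
      omega

theorem pv_zip_snoc (l : List Int) (n : Int) (h : l ≠ []) :
    (l ++ [n]).zip (l ++ [n]).tail = l.zip l.tail ++ [(l.getLastD (-1), n)] := by
  induction l with
  | nil => simp at h
  | cons a t ih =>
    cases t with
    | nil => simp [List.zip]
    | cons b t' =>
      have ht := ih (by simp)
      simp only [List.cons_append, List.tail_cons, List.zip_cons_cons] at *
      rw [ht]
      simp

theorem pvGaps_snoc (m n : Int) (l : List Int) (h : l ≠ []) :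
    pvGaps m (l ++ [n]) = pvGaps m l + (if n - l.getLastD (-1) ≤ m then 1 else 0) := by
  unfold pvGaps
  rw [pv_zip_snoc l n h, List.countP_append]
  simp only [List.countP_cons, List.countP_nil]
  by_cases hc : n - l.getLastD (-1) ≤ m <;> simp [hc]

theorem pvGaps_singleton (m n : Int) : pvGaps m [n] = 0 := by
  simp [pvGaps, List.zip]

-- sum over a Nodup list when exactly the x entry changes
theorem pv_sum_map_update (x : Int) (f f' : Int → Int) :
    ∀ keys : List Int, keys.Nodup → x ∈ keys → (∀ k, k ≠ x → f' k = f k) →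
      (keys.map f').sum = (keys.map f).sum + (f' x - f x) := by
  intro keys
  induction keys with
  | nil => intro _ hx _; simp at hx
  | cons k t ih =>
    intro hnd hx hagree
    rcases List.nodup_cons.mp hnd with ⟨hk, hndt⟩
    by_cases hkx : k = x
    · subst hkx
      have ht : ∀ j ∈ t, f' j = f j := fun j hj => hagree j (fun e => hk (e ▸ hj))
      simp only [List.map_cons, List.sum_cons, List.map_congr_left ht]
      ring
    · have hxt : x ∈ t := by
        rcases List.mem_cons.mp hx with h | h
        · exact absurd h.symm hkx
        · exact h
      simp only [List.map_cons, List.sum_cons, hagree k hkx, ih hndt hxt hagree]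
      ring

-- A's fold over range 0 n is insensitive to elements at positions ≥ n
theorem pv_stable (init : List Int) (x m : Int) (s : Int × Int) :
    (PySem.List.pyRange 0 (init.length : Int) 1).foldl (pvStepA (init ++ [x]) m) s
      = (PySem.List.pyRange 0 (init.length : Int) 1).foldl (pvStepA init m) s := by
  apply PySem.List.foldl_congr_mem
  intro acc i hi
  rw [PySem.List.mem_pyRange_one] at hi
  obtain ⟨h0, hn⟩ := hi
  have hiN : i.toNat < init.length := by omega
  have hget : PySem.List.pyGetD (init ++ [x]) i 0 = PySem.List.pyGetD init i 0 := by
    rw [PySem.List.pyGetD_eq_getElem _ _ h0 (by simp; omega),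
        PySem.List.pyGetD_eq_getElem _ _ h0 (by exact_mod_cast hn)]
    rw [List.getElem_append_left hiN]
  have hslice : ∀ a : Int, 0 ≤ a →
      PySem.List.slice (init ++ [x]) (some a) (some i) = PySem.List.slice init (some a) (some i) := by
    intro a ha
    rw [PySem.List.slice_toNat _ ha h0, PySem.List.slice_toNat _ ha h0]
    by_cases hle : a.toNat <= init.length
    · rw [List.drop_append_of_le_length hle]
      have : i.toNat - a.toNat ≤ (List.drop a.toNat init).length := by
        simp [List.length_drop]; omega
      rw [List.take_append_of_le_length this]
    · have h1 : List.drop a.toNat init = [] := List.drop_eq_nil_of_le (by omega)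
      have h2 : i.toNat - a.toNat = 0 := by omega
      simp [h1, h2]
  have hpre : PySem.List.slice (init ++ [x]) none (some i) = PySem.List.slice init none (some i) := by
    rw [PySem.List.slice_to _ h0, PySem.List.slice_to _ h0]
    exact List.take_append_of_le_length (by omega)
  simp only [pvStepA, hget, hpre, hslice _ (show (0:Int) ≤ if i - m < 0 then 0 else i - m by split <;> omega)]

-- characterisation of A's loop: total = len - #distinct, prof = Σ_k gaps ≤ m in pvOcc k
theorem pv_main (m : Int) (lista : List Int) :
    (PySem.List.pyRange 0 (lista.length : Int) 1).foldl (pvStepA lista m) (0, 0)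
      = ((lista.length : Int) - ((PySem.Set.ofList lista).length : Int),
         ((PySem.Set.ofList lista).map (fun k => pvGaps m (pvOcc lista k))).sum) := by
  induction lista using List.reverseRecOn with
  | nil => simp [PySem.Set.ofList, PySem.List.pyRange]
  | append_singleton init x ih =>
    rw [show PySem.List.pyRange 0 ((init ++ [x]).length : Int) 1
          = PySem.List.pyRange 0 (init.length : Int) 1 ++ [(init.length : Int)] by
        have h1 : ((init ++ [x]).length : Int) = (init.length : Int) + 1 := by simp
        rw [h1]; exact PySem.List.pyRange_one_succ_right (by positivity)]
    rw [List.foldl_append, pv_stable, ih]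
    have hx : PySem.List.pyGetD (init ++ [x]) (init.length : Int) 0 = x := by
      rw [PySem.List.pyGetD_natCast]; simp [List.getD]
    have hpre2 : PySem.List.slice (init ++ [x]) none (some (init.length : Int)) = init := by
      rw [PySem.List.slice_to_natCast]; simp
    have hofl : PySem.Set.ofList (init ++ [x]) = PySem.Set.add (PySem.Set.ofList init) x :=
      PySem.Set.ofList_append_singleton init x
    have hlen : ((init ++ [x]).length : Int) = (init.length : Int) + 1 := by simp
    -- the window slice is a suffix of init
    have hwin : PySem.List.slice (init ++ [x])
        (some (if (init.length : Int) - m < 0 then 0 else (init.length : Int) - m))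
        (some (init.length : Int))
        = init.drop (init.length - (if 0 < m then m else 0).toNat) := by
      rw [PySem.List.slice_toNat _ (by split <;> omega) (by positivity)]
      by_cases hm : 0 < m
      · have hk : (if 0 < m then m else 0).toNat = m.toNat := by simp [hm]
        by_cases hlt : (init.length : Int) - m < 0
        · simp only [if_pos hlt, hk]
          have h0 : (0:Int).toNat = 0 := rfl
          rw [h0]
          have h1 : init.length - m.toNat = 0 := by omega
          rw [h1]
          simp only [List.drop_zero, Nat.sub_zero]
          rw [List.take_append_of_le_length (by omega)]
          exact List.take_of_length_le (by omega)
        · simp only [if_neg hlt, hk]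
          have hp : ((init.length : Int) - m).toNat = init.length - m.toNat := by omega
          rw [hp, List.drop_append_of_le_length (by omega)]
          rw [List.take_append_of_le_length (by simp [List.length_drop])]
          apply List.take_of_length_le
          simp [List.length_drop]
      · have hk : (if 0 < m then m else 0).toNat = 0 := by simp [hm]
        rw [hk]
        by_cases hlt : (init.length : Int) - m < 0
        · exfalso; omega
        · simp only [if_neg hlt]
          have h1 : (init.length : Int).toNat - ((init.length : Int) - m).toNat = 0 := by omega
          rw [h1]
          simp [List.drop_eq_nil_of_le]
    have hwmem := pv_mem_drop_iff init x (init.length - (if 0 < m then m else 0).toNat)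
    by_cases hmem : x ∈ init
    · -- x seen before: total += 1; window term changes at key x only
      have hmax0 : 0 ≤ pvMax init x := (pvMax_nonneg_iff init x).mpr hmem
      have hmaxlt : pvMax init x < (init.length : Int) := pvMax_lt init x
      have hocc : pvOcc init x ≠ [] := by
        intro h0
        have : pvMax init x = -1 := by simp [pvMax, h0]
        omega
      have hadd : PySem.Set.add (PySem.Set.ofList init) x = PySem.Set.ofList init :=
        PySem.Set.add_of_mem ((PySem.Set.mem_ofList init x).mpr hmem)
      have hgetl : (pvOcc init x).getLastD (-1) = pvMax init x := rfl
      -- A's window test ⇔ the gap to the last occurrence is at most m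
      have hcond : (x ∈ init.drop (init.length - (if 0 < m then m else 0).toNat))
          ↔ ((init.length : Int) - pvMax init x ≤ m) := by
        rw [hwmem]
        split_ifs with hm <;> constructor <;> intro h <;> omega
      have hsum : ((PySem.Set.ofList (init ++ [x])).map (fun k => pvGaps m (pvOcc (init ++ [x]) k))).sum
          = ((PySem.Set.ofList init).map (fun k => pvGaps m (pvOcc init k))).sum
            + (if (init.length : Int) - pvMax init x ≤ m then 1 else 0) := by
        rw [hofl, hadd]
        rw [pv_sum_map_update x (fun k => pvGaps m (pvOcc init k)) (fun k => pvGaps m (pvOcc (init ++ [x]) k))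
              (PySem.Set.ofList init) (PySem.Set.nodup_ofList init)
              ((PySem.Set.mem_ofList init x).mpr hmem)
              (by intro k hk
                  show pvGaps m (pvOcc (init ++ [x]) k) = pvGaps m (pvOcc init k)
                  rw [pvOcc_snoc]; simp [hk])]
        rw [pvOcc_snoc, if_pos rfl, pvGaps_snoc m _ _ hocc, hgetl]
        ring
      rw [hsum, hofl, hadd, hlen]
      simp only [List.foldl_cons, List.foldl_nil, pvStepA, hx, hpre2, hwin]
      by_cases hw : x ∈ init.drop (init.length - (if 0 < m then m else 0).toNat)
      · rw [if_pos (by simp only [List.contains_eq_mem, decide_eq_true_eq]; exact hmem),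
            if_pos (by simp only [List.contains_eq_mem, decide_eq_true_eq]; exact hw),
            if_pos (hcond.mp hw)]
        apply Prod.ext <;> simp <;> try ring
      · rw [if_pos (by simp only [List.contains_eq_mem, decide_eq_true_eq]; exact hmem),
            if_neg (by simp only [List.contains_eq_mem, decide_eq_true_eq]; exact hw),
            if_neg (fun h => hw (hcond.mpr h))]
        apply Prod.ext <;> simp <;> try ring
    · -- x fresh: total unchanged, its window term is the gaps of a singleton = 0
      have hadd : PySem.Set.add (PySem.Set.ofList init) x = PySem.Set.ofList init ++ [x] :=
        PySem.Set.add_of_not_mem (fun h => hmem ((PySem.Set.mem_ofList init x).mp h))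
      have hnw : x ∉ init.drop (init.length - (if 0 < m then m else 0).toNat) :=
        fun h => hmem (List.mem_of_mem_drop h)
      have hsum : ((PySem.Set.ofList (init ++ [x])).map (fun k => pvGaps m (pvOcc (init ++ [x]) k))).sum
          = ((PySem.Set.ofList init).map (fun k => pvGaps m (pvOcc init k))).sum := by
        rw [hofl, hadd, List.map_append, List.sum_append]
        have h1 : ∀ k ∈ PySem.Set.ofList init,
            pvGaps m (pvOcc (init ++ [x]) k) = pvGaps m (pvOcc init k) := by
          intro k hk
          have hkx : k ≠ x := fun e => hmem (e ▸ (PySem.Set.mem_ofList init k).mp hk)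
          rw [pvOcc_snoc]; simp [hkx]
        rw [List.map_congr_left h1]
        have h2 : pvOcc (init ++ [x]) x = [(init.length : Int)] := by
          rw [pvOcc_snoc, pvOcc_eq_nil_of_not_mem init x hmem]; simp
        simp [h2, pvGaps_singleton]
      have hlenset : ((PySem.Set.ofList (init ++ [x])).length : Int)
          = ((PySem.Set.ofList init).length : Int) + 1 := by
        rw [hofl, hadd]; simp
      rw [hsum, hlenset, hlen]
      simp only [List.foldl_cons, List.foldl_nil, pvStepA, hx, hpre2, hwin]
      rw [if_neg (by simp only [List.contains_eq_mem, decide_eq_true_eq]; exact hmem),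
          if_neg (by simp only [List.contains_eq_mem, decide_eq_true_eq]; exact hnw)]
      apply Prod.ext <;> simp

-- characterisation of B: the dict fold yields exactly the pvOcc groups
theorem pv_alt (examenes : List Int × Int) :
    copia_examen_alt examenes
      = ((examenes.1.length : Int) - ((PySem.Set.ofList examenes.1).length : Int),
         ((PySem.Set.ofList examenes.1).map (fun k => pvGaps examenes.2 (pvOcc examenes.1 k))).sum) := by
  obtain ⟨lista, m⟩ := examenes
  unfold copia_examen_alt
  simp only []
  set pos := (PySem.List.enumerate lista).foldl
      (fun d p => PySem.Dict.modify d p.2 [] (fun l => l ++ [p.1])) PySem.Dict.empty with hpos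
  have hkeys : pos.keys = PySem.Set.ofList lista := by
    rw [hpos, PySem.Dict.keys_foldl_modify_key (PySem.List.enumerate lista) (fun p => p.2) []
          (fun _ p => fun l => l ++ [p.1]) PySem.Dict.empty]
    rw [PySem.Dict.keys_empty, PySem.Set.update_nil_left, PySem.List.map_snd_enumerate]
  have hnd : pos.keys.Nodup := by rw [hkeys]; exact PySem.Set.nodup_ofList lista
  have hswap : (PySem.List.enumerate lista).foldl
        (fun d p => PySem.Dict.modify d p.2 [] (fun l => l ++ [p.1])) PySem.Dict.empty
      = ((PySem.List.enumerate lista).map (fun p => (p.2, p.1))).foldl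
          (fun d q => PySem.Dict.modify d q.1 [] (fun l => l ++ [q.2])) PySem.Dict.empty := by
    rw [List.foldl_map]
  have hget : ∀ k, pos.getD k [] = pvOcc lista k := by
    intro k
    rw [hpos, hswap]
    rw [PySem.Dict.getD_foldl_modify_append]
    simp [pvOcc, List.filter_map, List.map_map, Function.comp_def]
  have hsize : (PySem.Dict.size pos : Int) = ((PySem.Set.ofList lista).length : Int) := by
    have : pos.size = pos.keys.length := by
      simp [PySem.Dict.size, PySem.Dict.keys, List.length_map]
    rw [this, hkeys]
  have hvals : PySem.Dict.values pos = pos.keys.map (fun k => pos.getD k []) :=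
    PySem.Dict.values_eq_map_keys pos hnd []
  rw [hsize, hvals, hkeys, List.foldl_map]
  have hfold : (PySem.Set.ofList lista).foldl (fun a k => pvGapsFrom m a (pos.getD k [])) 0
      = 0 + ((PySem.Set.ofList lista).map (fun k => pvGaps m (pvOcc lista k))).sum := by
    rw [show (fun (a : Int) (k : Int) => pvGapsFrom m a (pos.getD k []))
          = (fun (a : Int) (k : Int) => a + pvGaps m (pvOcc lista k)) by
        funext a k; rw [pvGapsFrom_eq, hget]]
    exact PySem.List.foldl_add _ _ 0
  rw [hfold]
  simp

-- ===== VERDICT (by name: the statement is the Claim_ definition above) =====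
theorem copia_examen_spec : Claim_equal_copia_examen := by
  intro ex _
  unfold Spec_copia_examen
  rw [pv_alt]
  have hA : copia_examen ex
      = (PySem.List.pyRange 0 (ex.1.length : Int) 1).foldl (pvStepA ex.1 ex.2) (0, 0) := rfl
  rw [hA, pv_main]
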